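-- pv_equiv track=rewrite | github.com/u6684258/instance-generator | src/asp_translator.py | translate_to_asp_variable
-- ===== SOURCE A (Python) =====
-- def replace_special_symbols(string: str):
--     # symbols '@' and '-' are replaced with '_AT_' and '_DASH_', respectively
--     output = string
--     for replacement in [('@', '_AT_'), ('-', '_DASH_')]:
--         output = output.replace(*replacement)
--     return output
--
-- def get_forbidden_symbols(string: str):
--     # clingo allows the following symbols for constants and variables: [A-Za-z0-9_’]
--     allowed_symbols = [chr(c) for c in range(ord('a'), ord('z')+1)] + [chr(c)
--             for c in range(ord('A'), ord('Z')+1)] + [str(n) for n in range(10)] + ['_', '’']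
--     return [sym for sym in string if sym not in allowed_symbols]
--
-- def get_index_of_first_non_underscore(string: str):
--     for i in range(len(string)):
--         if string[i] != '_':
--             return i
--     return None
--
-- def translate_to_asp_variable(pddl_variable: str):
--     assert pddl_variable[0] == "?"
--     asp_variable = pddl_variable[1:]
--
--     # replace forbidden symbols '@' and '-'
--     forbidden_symbols = get_forbidden_symbols(asp_variable)
--     if '@' in forbidden_symbols or '-' in forbidden_symbols:
--         asp_variable = replace_special_symbols(asp_variable)
--         forbidden_symbols = [sym for sym in forbidden_symbols if sym not in ['@',
--             '-']]
--     assert(len(forbidden_symbols) == 0)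
--
--     # check if first character, potentially after a sequence of underscores
--     # '_', is a letter, if not add prefix 'Var_'
--     first_non_underscore = get_index_of_first_non_underscore(asp_variable)
--     if first_non_underscore is None or not asp_variable[first_non_underscore].isalpha():
--         asp_variable = "Var_" + asp_variable
--
--     # Variables in clingo must start with a upper case letter. We transform the
--     # entire variable to lower case so that "var", "VAR" and "Var" (identical
--     # variables in PDDL) are mapped to the same transformed string.
--     return asp_variable.upper()
-- ===== SOURCE B (Python) =====
-- def translate_to_asp_variable(pddl_variable: str):
--     assert pddl_variable[0] == "?"
--     # single fused pass: translate/validate each character while building the output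
--     out = []
--     for c in pddl_variable[1:]:
--         if c == '@':
--             out.append('_AT_')
--         elif c == '-':
--             out.append('_DASH_')
--         elif 'a' <= c <= 'z' or 'A' <= c <= 'Z' or '0' <= c <= '9' or c == '_' or c == '’':
--             out.append(c)
--         else:
--             assert False
--     asp_variable = ''.join(out)
--     stripped = asp_variable.lstrip('_')
--     if stripped == '' or not stripped[0].isalpha():
--         asp_variable = 'Var_' + asp_variable
--     return asp_variable.upper()
-- ===== Notes on version B (the rewrite author's own statement) =====
-- stated objective: simpler
-- what changed: Collapses A's four separate passes (collect forbidden symbols, conditional double str.replace, re-filter, index-loop for the first non-underscore) into one fused translate-and-validate pass plus an lstrip-based prefix test.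
import Mathlib
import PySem

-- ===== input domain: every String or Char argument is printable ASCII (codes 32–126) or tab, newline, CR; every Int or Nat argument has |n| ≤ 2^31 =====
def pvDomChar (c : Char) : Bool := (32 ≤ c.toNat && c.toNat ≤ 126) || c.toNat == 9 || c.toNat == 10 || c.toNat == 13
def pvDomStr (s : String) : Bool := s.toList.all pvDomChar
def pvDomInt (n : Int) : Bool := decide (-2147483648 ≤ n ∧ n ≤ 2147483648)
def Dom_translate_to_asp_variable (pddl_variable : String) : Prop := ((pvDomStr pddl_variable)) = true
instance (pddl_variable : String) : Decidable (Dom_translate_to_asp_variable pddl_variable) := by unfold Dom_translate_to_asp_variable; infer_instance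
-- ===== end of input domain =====

-- B replaces A's four passes (forbidden-symbol collection, conditional double replace,
-- re-filter, index loop for the first non-underscore) by one fused translate-and-validate
-- pass plus an lstrip-based prefix test; same return value on all inputs admitted by Pre_.

-- ===== PORT A =====

-- allowed_symbols of get_forbidden_symbols, built from the same ranges
def pvAllowed : List Char :=
  ((List.range 26).map (fun i => Char.ofNat ('a'.toNat + i))) ++
  ((List.range 26).map (fun i => Char.ofNat ('A'.toNat + i))) ++
  ((List.range 10).map (fun i => Char.ofNat ('0'.toNat + i))) ++
  ['_', '’']

-- replace_special_symbols: output.replace('@','_AT_').replace('-','_DASH_')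
def pvReplaceSpecial (s : List Char) : List Char :=
  PySem.Chars.replace (PySem.Chars.replace s ['@'] ("_AT_".toList)) ['-'] ("_DASH_".toList)

-- get_index_of_first_non_underscore: the index loop as structural recursion
def pvFirstNonUnderscore : List Char → Option Nat
  | [] => none
  | c :: rest => if c ≠ '_' then some 0 else (pvFirstNonUnderscore rest).map (· + 1)

-- the prefix step of A: index the string at the loop's result and test isalpha
def pvPrefixA (s : List Char) : List Char :=
  match pvFirstNonUnderscore s with
  | none => "Var_".toList ++ s
  | some i =>
    match s[i]? with
    | some c => if PySem.Chars.isalpha c then s else "Var_".toList ++ s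
    | none => "Var_".toList ++ s  -- unreachable: the loop's index is always in range

def translate_to_asp_variable (pddl_variable : String) : String :=
  -- assert pddl_variable[0] == '?' and the forbidden-symbol assert are guaranteed by Pre_
  let asp0 := pddl_variable.toList.drop 1
  let forbidden := asp0.filter (fun c => decide (c ∉ pvAllowed))
  let asp1 := if '@' ∈ forbidden ∨ '-' ∈ forbidden then pvReplaceSpecial asp0 else asp0
  PySem.Str.upper (String.ofList (pvPrefixA asp1))

-- ===== PORT B =====

-- the fused per-character translate-and-validate pass of Source B
def pvEmit : List Char → List Char
  | [] => []
  | c :: rest =>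
    (if c = '@' then "_AT_".toList
     else if c = '-' then "_DASH_".toList
     else if ('a' ≤ c ∧ c ≤ 'z') ∨ ('A' ≤ c ∧ c ≤ 'Z') ∨ ('0' ≤ c ∧ c ≤ '9') ∨ c = '_' ∨ c = '’'
       then [c]
     else [c])  -- Python: assert False — unreachable under Pre_
    ++ pvEmit rest

-- lstrip('_') then test the first remaining character
def pvPrefixB (s : List Char) : List Char :=
  match s.dropWhile (fun c => c == '_') with
  | [] => "Var_".toList ++ s
  | c :: _ => if ¬ PySem.Chars.isalpha c then "Var_".toList ++ s else s

def translate_to_asp_variable_alt (pddl_variable : String) : String :=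
  let asp := pvEmit (pddl_variable.toList.drop 1)
  PySem.Str.upper (String.ofList (pvPrefixB asp))

-- ===== PRECONDITION & SPEC =====
-- Pre_ excludes exactly the inputs where A raises: the empty string (IndexError),
-- a first character other than '?', or a character outside [A-Za-z0-9_’@-]
-- in the rest (AssertionError).
def pvOkChar (c : Char) : Bool :=
  ('a' ≤ c && c ≤ 'z') || ('A' ≤ c && c ≤ 'Z') || ('0' ≤ c && c ≤ '9') ||
  c == '_' || c == '’' || c == '@' || c == '-'

def Pre_translate_to_asp_variable (pddl_variable : String) : Prop :=
  pddl_variable.toList.head? = some '?' ∧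
  (pddl_variable.toList.drop 1).all pvOkChar = true
instance (pddl_variable : String) : Decidable (Pre_translate_to_asp_variable pddl_variable) := by
  unfold Pre_translate_to_asp_variable; infer_instance

def pvWitness_translate_to_asp_variable : String := "?obj-1@x"

def Spec_translate_to_asp_variable (pddl_variable : String) (out : String) : Prop := out = translate_to_asp_variable_alt pddl_variable
instance (pddl_variable : String) (out : String) : Decidable (Spec_translate_to_asp_variable pddl_variable out) := by unfold Spec_translate_to_asp_variable; infer_instance

-- ===== CLAIM (what is proved, stated in full; the proofs are below) =====
def Claim_equal_translate_to_asp_variable : Prop := ∀ (pddl_variable : String), Dom_translate_to_asp_variable pddl_variable → Pre_translate_to_asp_variable pddl_variable → Spec_translate_to_asp_variable pddl_variable (translate_to_asp_variable pddl_variable)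

-- ===== LEMMAS AND PROOFS =====

-- a character admitted by Pre_ is an allowed symbol or one of the two specials
theorem mem_range_map (c : Char) (lo : Char) (n : Nat)
    (h1 : lo ≤ c) (h2 : c.toNat < lo.toNat + n) :
    c ∈ (List.range n).map (fun i => Char.ofNat (lo.toNat + i)) := by
  simp only [List.mem_map, List.mem_range]
  refine ⟨c.toNat - lo.toNat, ?_, ?_⟩
  · have h3 : lo.toNat ≤ c.toNat := Fin.mk_le_mk.mp h1
    omega
  · have h3 : lo.toNat ≤ c.toNat := Fin.mk_le_mk.mp h1
    rw [Nat.add_sub_cancel' h3, Char.ofNat_toNat]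

theorem ok_char_cases (c : Char) (h : pvOkChar c = true) :
    c ∈ pvAllowed ∨ c = '@' ∨ c = '-' := by
  simp only [pvOkChar, Bool.or_eq_true, Bool.and_eq_true, decide_eq_true_eq, beq_iff_eq] at h
  rcases h with ((((((⟨h1,h2⟩|⟨h1,h2⟩)|⟨h1,h2⟩)|h)|h)|h)|h)
  · left; unfold pvAllowed
    simp only [List.mem_append]
    left; left; left
    refine mem_range_map c 'a' 26 h1 ?_
    have hz : c.toNat ≤ 122 := Fin.mk_le_mk.mp h2
    have hlo : 'a'.toNat = 97 := rfl
    omega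
  · left; unfold pvAllowed
    simp only [List.mem_append]
    left; left; right
    refine mem_range_map c 'A' 26 h1 ?_
    have hz : c.toNat ≤ 90 := Fin.mk_le_mk.mp h2
    have hlo : 'A'.toNat = 65 := rfl
    omega
  · left; unfold pvAllowed
    simp only [List.mem_append]
    left; right
    refine mem_range_map c '0' 10 h1 ?_
    have hz : c.toNat ≤ 57 := Fin.mk_le_mk.mp h2
    have hlo : '0'.toNat = 48 := rfl
    omega
  · subst h; left; decide
  · subst h; left; decide
  · subst h; right; left; rfl
  · subst h; right; right; rfl

-- single-character str.replace is a flatMap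
theorem replace_go_single (x : Char) (new : List Char) :
    ∀ (l : List Char) (fuel : Nat) (acc : List Char), l.length ≤ fuel →
      PySem.Chars.replace.go [x] new fuel l acc =
        acc.reverse ++ l.flatMap (fun c => if c = x then new else [c]) := by
  intro l
  induction l with
  | nil =>
      intro fuel acc _
      cases fuel <;> simp [PySem.Chars.replace.go]
  | cons c t ih =>
      intro fuel acc hle
      cases fuel with
      | zero => simp at hle
      | succ n =>
        by_cases hcx : c = x
        · subst hcx
          have hpre : List.isPrefixOf [c] (c :: t) = true := by
            simp [List.isPrefixOf]
          rw [PySem.Chars.replace.go]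
          rw [if_pos hpre]
          have hdrop : List.drop [c].length (c :: t) = t := by simp
          rw [hdrop, ih n (new.reverse ++ acc) (by simpa using hle)]
          simp
        · have hpre : List.isPrefixOf [x] (c :: t) = false := by
            simp [List.isPrefixOf]
            exact fun h => absurd h.symm hcx
          rw [PySem.Chars.replace.go]
          rw [if_neg (by simp [hpre])]
          rw [ih n (c :: acc) (by simpa using hle)]
          simp [hcx]

theorem replace_single (x : Char) (new s : List Char) :
    PySem.Chars.replace s [x] new = s.flatMap (fun c => if c = x then new else [c]) := by
  rw [PySem.Chars.replace]
  rw [if_neg (by simp)]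
  simpa using replace_go_single x new s s.length [] le_rfl

-- pvEmit is a flatMap of the per-character step
theorem pvEmit_eq_flatMap (s : List Char) :
    pvEmit s = s.flatMap (fun c =>
      if c = '@' then "_AT_".toList else if c = '-' then "_DASH_".toList else [c]) := by
  induction s with
  | nil => simp [pvEmit]
  | cons c t ih =>
      by_cases h1 : c = '@' <;> by_cases h2 : c = '-' <;>
        simp [pvEmit, h1, h2, ih]

-- '@' and '-' are not allowed symbols
theorem at_not_allowed : '@' ∉ pvAllowed := by decide
theorem dash_not_allowed : '-' ∉ pvAllowed := by decide

-- on allowed-or-special characters, the two chained replaces equal the fused pass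
theorem replaceSpecial_eq_emit (s : List Char)
    (hs : ∀ d ∈ s, d ∈ pvAllowed ∨ d = '@' ∨ d = '-') :
    pvReplaceSpecial s = pvEmit s := by
  rw [pvReplaceSpecial, replace_single, replace_single, List.flatMap_assoc,
      pvEmit_eq_flatMap]
  apply List.flatMap_congr
  intro c hc
  rcases hs c hc with h | h | h
  · have h1 : c ≠ '@' := fun e => at_not_allowed (e ▸ h)
    have h2 : c ≠ '-' := fun e => dash_not_allowed (e ▸ h)
    simp [h1, h2]
  · subst h; decide
  · subst h; decide

-- without '@' or '-' the fused pass is the identity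
theorem emit_eq_self (s : List Char) (h1 : '@' ∉ s) (h2 : '-' ∉ s) :
    pvEmit s = s := by
  induction s with
  | nil => rfl
  | cons c t ih =>
      simp only [List.mem_cons, not_or] at h1 h2
      have hc1 : c ≠ '@' := fun e => h1.1 e.symm
      have hc2 : c ≠ '-' := fun e => h2.1 e.symm
      simp [pvEmit, hc1, hc2, ih h1.2 h2.2]

-- A's replacement stage equals B's fused pass
theorem stage1_eq (s : List Char)
    (hs : ∀ d ∈ s, d ∈ pvAllowed ∨ d = '@' ∨ d = '-') :
    (if '@' ∈ s.filter (fun c => decide (c ∉ pvAllowed)) ∨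
        '-' ∈ s.filter (fun c => decide (c ∉ pvAllowed))
     then pvReplaceSpecial s else s) = pvEmit s := by
  split_ifs with h
  · exact replaceSpecial_eq_emit s hs
  · rw [List.mem_filter, List.mem_filter] at h
    push Not at h
    refine (emit_eq_self s ?_ ?_).symm
    · intro hmem
      have := h.1 hmem
      simp [at_not_allowed] at this
    · intro hmem
      have := h.2 hmem
      simp [dash_not_allowed] at this

-- the two prefix decisions
def pvDecA (s : List Char) : Bool :=
  match pvFirstNonUnderscore s with
  | none => true
  | some i =>
    match s[i]? with
    | some c => ! PySem.Chars.isalpha c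
    | none => true

def pvDecB (s : List Char) : Bool :=
  match s.dropWhile (fun c => c == '_') with
  | [] => true
  | c :: _ => ! PySem.Chars.isalpha c

theorem pvPrefixA_eq_if (s : List Char) :
    pvPrefixA s = if pvDecA s then "Var_".toList ++ s else s := by
  unfold pvPrefixA pvDecA
  rcases h : pvFirstNonUnderscore s with _ | i
  · simp
  · rcases hg : s[i]? with _ | c
    · simp [hg]
    · by_cases ha : PySem.Chars.isalpha c <;> simp [hg, ha]

theorem pvPrefixB_eq_if (s : List Char) :
    pvPrefixB s = if pvDecB s then "Var_".toList ++ s else s := by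
  unfold pvPrefixB pvDecB
  rcases h : s.dropWhile (fun c => c == '_') with _ | ⟨c, t⟩
  · simp
  · by_cases ha : PySem.Chars.isalpha c <;> simp [ha]

theorem pvDec_eq (s : List Char) : pvDecA s = pvDecB s := by
  induction s with
  | nil => rfl
  | cons c t ih =>
      by_cases hc : c = '_'
      · subst hc
        have h1 : pvFirstNonUnderscore ('_' :: t) = (pvFirstNonUnderscore t).map (· + 1) := by
          simp [pvFirstNonUnderscore]
        have h2 : List.dropWhile (fun c => c == '_') ('_' :: t) =
            List.dropWhile (fun c => c == '_') t := by
          simp [List.dropWhile_cons_of_pos]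
        unfold pvDecA pvDecB
        rw [h1, h2]
        unfold pvDecA pvDecB at ih
        rcases h : pvFirstNonUnderscore t with _ | i
        · rw [h] at ih; simpa using ih
        · rw [h] at ih; simpa using ih
      · unfold pvDecA pvDecB
        simp [pvFirstNonUnderscore, hc, List.dropWhile_cons_of_neg, Ne.symm]

theorem pvPrefix_eq (s : List Char) : pvPrefixA s = pvPrefixB s := by
  rw [pvPrefixA_eq_if, pvPrefixB_eq_if, pvDec_eq]

-- ===== VERDICT (by name: the statement is the Claim_ definition above) =====
theorem translate_to_asp_variable_spec : Claim_equal_translate_to_asp_variable := by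
  intro p _hdom hpre
  unfold Spec_translate_to_asp_variable translate_to_asp_variable translate_to_asp_variable_alt
  have key : pvPrefixA
      (if '@' ∈ (p.toList.drop 1).filter (fun c => decide (c ∉ pvAllowed)) ∨
          '-' ∈ (p.toList.drop 1).filter (fun c => decide (c ∉ pvAllowed))
       then pvReplaceSpecial (p.toList.drop 1) else p.toList.drop 1) =
      pvPrefixB (pvEmit (p.toList.drop 1)) := by
    have hall : ∀ d ∈ p.toList.drop 1, d ∈ pvAllowed ∨ d = '@' ∨ d = '-' := by
      intro d hd
      have h2 := hpre.2
      rw [List.all_eq_true] at h2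
      exact ok_char_cases d (h2 d hd)
    rw [stage1_eq _ hall, pvPrefix_eq]
  exact congrArg (fun l => PySem.Str.upper (String.ofList l)) key
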